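-- pv_equiv track=rewrite | github.com/adambernard55/sie-engine | tools/wp_import.py | _build_reverse_topic_map
-- ===== SOURCE A (Python) =====
-- def _build_reverse_topic_map(topic_mapping: dict) -> dict[int, str]:
--     """Invert topic_mapping: topic_id → folder path.
--
--     When multiple paths map to the same ID, the most specific (longest) wins.
--     """
--     reverse = {}
--     # Sort by path length descending so most specific paths take priority
--     for path_pattern, topic_id in sorted(topic_mapping.items(),
--                                           key=lambda x: len(x[0]),
--                                           reverse=True):
--         tid = int(topic_id)
--         if tid not in reverse:
--             # Convert path pattern to folder: /AI/0_fundamentals/ -> AI/0_fundamentals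
--             folder = path_pattern.strip("/")
--             reverse[tid] = folder
--     return reverse
-- ===== SOURCE B (Python) =====
-- def _build_reverse_topic_map(topic_mapping: dict) -> dict[int, str]:
--     """Invert topic_mapping: topic_id -> folder path (longest path wins).
--
--     Single pass keeping the running best (longest, earliest) path per id,
--     then a final sort of the (typically few) winners by descending length
--     and original position, matching the stable-sort priority order.
--     """
--     best = {}
--     for idx, (path_pattern, topic_id) in enumerate(topic_mapping.items()):
--         tid = int(topic_id)
--         cur = best.get(tid)
--         if cur is None or len(path_pattern) > len(cur[0]):
--             best[tid] = (path_pattern, idx)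
--     winners = sorted(best.items(), key=lambda kv: (-len(kv[1][0]), kv[1][1]))
--     return {tid: path.strip("/") for tid, (path, _idx) in winners}
-- ===== Notes on version B (the rewrite author's own statement) =====
-- stated objective: alternative
-- what changed: A stably sorts the whole mapping by path length descending and lets the first entry per tid win; B makes one unsorted pass keeping the running best (longest, earliest) path per tid in a dict and then sorts only the distinct winners by (-length, original index), which provably reproduces A's order exactly.
import Mathlib
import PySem

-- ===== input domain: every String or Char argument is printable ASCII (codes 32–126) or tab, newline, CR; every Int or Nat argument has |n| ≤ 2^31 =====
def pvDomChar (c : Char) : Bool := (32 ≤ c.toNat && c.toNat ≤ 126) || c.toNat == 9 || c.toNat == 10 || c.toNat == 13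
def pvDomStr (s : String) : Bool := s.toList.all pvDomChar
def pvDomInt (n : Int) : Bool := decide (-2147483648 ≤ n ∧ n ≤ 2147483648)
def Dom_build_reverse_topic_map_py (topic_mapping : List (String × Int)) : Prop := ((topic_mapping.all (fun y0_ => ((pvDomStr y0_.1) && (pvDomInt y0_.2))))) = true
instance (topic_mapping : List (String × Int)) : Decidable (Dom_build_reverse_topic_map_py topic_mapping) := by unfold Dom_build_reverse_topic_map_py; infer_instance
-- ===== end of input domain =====

-- B replaces A's full sort + first-wins dict by a single running-best pass per id
-- followed by a sort of only the distinct winners (objective: alternative decomposition).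

-- ===== PORT A =====
-- A's loop body: first insert per tid wins (tid = int(topic_id) is the identity on Int).
def pvStepA (reverse : PySem.Dict Int String) (pt : String × Int) : PySem.Dict Int String :=
  if reverse.contains pt.2 then reverse
  else reverse.insert pt.2 (PySem.Str.stripChars pt.1 "/")

def build_reverse_topic_map_py (topic_mapping : List (String × Int)) : List (Int × String) :=
  ((PySem.List.sorted topic_mapping (fun x => PySem.Str.len x.1) true).foldl
    pvStepA PySem.Dict.empty).items

-- ===== PORT B =====
-- B's loop body: keep the running best (longest, then earliest) path per tid.
def pvStepB (best : PySem.Dict Int (String × Int)) (ip : Int × (String × Int)) :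
    PySem.Dict Int (String × Int) :=
  match best.get? ip.2.2 with
  | none => best.insert ip.2.2 (ip.2.1, ip.1)
  | some cur =>
      if PySem.Str.len ip.2.1 > PySem.Str.len cur.1 then best.insert ip.2.2 (ip.2.1, ip.1)
      else best

def build_reverse_topic_map_py_alt (topic_mapping : List (String × Int)) : List (Int × String) :=
  let best := (PySem.List.enumerate topic_mapping).foldl pvStepB PySem.Dict.empty
  let winners := PySem.List.sorted2 best.items
    (fun kv => -(PySem.Str.len kv.2.1)) (fun kv => kv.2.2) false
  (winners.foldl
    (fun (out : PySem.Dict Int String) kv => out.insert kv.1 (PySem.Str.stripChars kv.2.1 "/"))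
    PySem.Dict.empty).items

-- ===== PRECONDITION & SPEC =====
def Spec_build_reverse_topic_map_py (topic_mapping : List (String × Int)) (out : List (Int × String)) : Prop := out = build_reverse_topic_map_py_alt topic_mapping
instance (topic_mapping : List (String × Int)) (out : List (Int × String)) : Decidable (Spec_build_reverse_topic_map_py topic_mapping out) := by unfold Spec_build_reverse_topic_map_py; infer_instance

-- ===== CLAIM (what is proved, stated in full; the proofs are below) =====
def Claim_equal_build_reverse_topic_map_py : Prop := ∀ (topic_mapping : List (String × Int)), Dom_build_reverse_topic_map_py topic_mapping → Spec_build_reverse_topic_map_py topic_mapping (build_reverse_topic_map_py topic_mapping)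

-- ===== LEMMAS AND PROOFS =====

-- Python's lexicographic two-key comparator, as sorted2 builds it internally.
def pvLex {α : Type} (k1 k2 : α → Int) (a b : α) : Bool :=
  decide (k1 a < k1 b) || (!decide (k1 b < k1 a) && decide (k2 a < k2 b))

-- comparator on enumerated entries (idx, (path, tid)): by length desc, then index asc
def pvBE (e f : Int × (String × Int)) : Bool :=
  pvLex (fun e => -(PySem.Str.len e.2.1)) (fun e => e.1) e f

-- comparator on winner items (tid, (path, idx)): by length desc, then index asc
def pvBW (p q : Int × (String × Int)) : Bool :=
  pvLex (fun kv => -(PySem.Str.len kv.2.1)) (fun kv => kv.2.2) p q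

-- first occurrence per tid, skipping tids already seen
def pvFirsts (seen : List Int) : List (Int × (String × Int)) → List (Int × (String × Int))
  | [] => []
  | e :: L => if e.2.2 ∈ seen then pvFirsts seen L else e :: pvFirsts (e.2.2 :: seen) L

-- e is the winning entry of its tid within P
def pvWinOf (P : List (Int × (String × Int))) (e : Int × (String × Int)) : Prop :=
  e ∈ P ∧ ∀ f ∈ P, f.2.2 = e.2.2 → f = e ∨ pvBE e f = true

-- the reshuffle (idx, (path, tid)) ↦ (tid, (path, idx))
def pvG (e : Int × (String × Int)) : Int × (String × Int) := (e.2.2, (e.2.1, e.1))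

-- --- generic pvLex facts ---
theorem pvLex_irr {α : Type} (k1 k2 : α → Int) (a : α) : pvLex k1 k2 a a = false := by
  simp [pvLex]

theorem pvLex_htr {α : Type} (k1 k2 : α → Int) (x y z : α)
    (h1 : pvLex k1 k2 x y = true) (h2 : pvLex k1 k2 z y = false) : pvLex k1 k2 z x = false := by
  simp [pvLex] at *; omega

theorem pvLex_trans {α : Type} (k1 k2 : α → Int) (x y z : α)
    (h1 : pvLex k1 k2 x y = true) (h2 : pvLex k1 k2 y z = true) : pvLex k1 k2 x z = true := by
  simp [pvLex] at *; omega

theorem pvLex_true_of_false_of_ne {α : Type} (k1 k2 : α → Int) (p q : α)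
    (h1 : pvLex k1 k2 q p = false) (h2 : k2 p ≠ k2 q) : pvLex k1 k2 p q = true := by
  simp [pvLex] at *; omega

-- --- generic insertion-sort (foldl insertBy) facts ---
theorem insertBy_nil {α : Type} (b : α → α → Bool) (x : α) :
    PySem.List.insertBy b x [] = [x] := rfl

theorem insertBy_cons {α : Type} (b : α → α → Bool) (x y : α) (ys : List α) :
    PySem.List.insertBy b x (y :: ys) =
      if b x y then x :: y :: ys else y :: PySem.List.insertBy b x ys := rfl

theorem pvhelp_asym {α : Type} (b : α → α → Bool)
    (hirr : ∀ a, b a a = false)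
    (htr : ∀ x y z, b x y = true → b z y = false → b z x = false)
    (x y : α) (h : b x y = true) : b y x = false :=
  htr x y y h (hirr y)

theorem insertBy_perm {α : Type} (b : α → α → Bool) (x : α) (l : List α) :
    (PySem.List.insertBy b x l).Perm (x :: l) := by
  induction l with
  | nil => simp [insertBy_nil]
  | cons y ys ih =>
      rw [insertBy_cons]
      by_cases h : b x y = true
      · simp [h]
      · simp only [h]
        exact (ih.cons y).trans (List.Perm.swap x y ys)

theorem insertBy_pairwise {α : Type} (b : α → α → Bool)
    (hirr : ∀ a, b a a = false)
    (htr : ∀ x y z, b x y = true → b z y = false → b z x = false)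
    (x : α) (l : List α) (h : l.Pairwise (fun p q => b q p = false)) :
    (PySem.List.insertBy b x l).Pairwise (fun p q => b q p = false) := by
  induction l with
  | nil => simp [insertBy_nil]
  | cons y ys ih =>
      rcases List.pairwise_cons.mp h with ⟨hy, hys⟩
      rw [insertBy_cons]
      by_cases hb : b x y = true
      · simp only [hb, if_true]
        refine List.pairwise_cons.mpr ⟨?_, h⟩
        intro z hz
        rcases List.mem_cons.mp hz with hz | hz
        · rw [hz]; exact pvhelp_asym b hirr htr x y hb
        · exact htr x y z hb (hy z hz)
      · simp only [hb]
        refine List.pairwise_cons.mpr ⟨?_, ih hys⟩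
        intro z hz
        have hz' := (insertBy_perm b x ys).mem_iff.mp hz
        rcases List.mem_cons.mp hz' with hz' | hz'
        · rw [hz']; simpa using hb
        · exact hy z hz'

theorem foldl_insertBy_perm {α : Type} (b : α → α → Bool) (xs : List α) :
    (xs.foldl (fun acc x => PySem.List.insertBy b x acc) []).Perm xs := by
  have gen : ∀ (xs : List α) (acc : List α),
      (xs.foldl (fun acc x => PySem.List.insertBy b x acc) acc).Perm (acc ++ xs) := by
    intro xs
    induction xs with
    | nil => intro acc; simp
    | cons x xs ih =>
        intro acc
        simp only [List.foldl_cons]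
        refine (ih (PySem.List.insertBy b x acc)).trans ?_
        refine (List.Perm.append_right xs (insertBy_perm b x acc)).trans ?_
        exact (List.perm_middle).symm
  simpa using gen xs []

theorem foldl_insertBy_pairwise {α : Type} (b : α → α → Bool)
    (hirr : ∀ a, b a a = false)
    (htr : ∀ x y z, b x y = true → b z y = false → b z x = false)
    (xs : List α) :
    (xs.foldl (fun acc x => PySem.List.insertBy b x acc) []).Pairwise
      (fun p q => b q p = false) := by
  have gen : ∀ (xs : List α) (acc : List α), acc.Pairwise (fun p q => b q p = false) →
      (xs.foldl (fun acc x => PySem.List.insertBy b x acc) acc).Pairwise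
        (fun p q => b q p = false) := by
    intro xs
    induction xs with
    | nil => intro acc h; simpa using h
    | cons x xs ih =>
        intro acc h
        exact ih _ (insertBy_pairwise b hirr htr x acc h)
  exact gen xs [] (by simp)

theorem perm_pairwise_unique {α : Type} (b : α → α → Bool) :
    ∀ {L1 L2 : List α}, L1.Perm L2 → L1.Pairwise (fun p q => b q p = false) →
      L2.Pairwise (fun p q => b p q = true) → L1 = L2 := by
  intro L1
  induction L1 with
  | nil => intro L2 hp _ _; exact (List.Perm.nil_eq hp).symm ▸ rfl
  | cons a t1 ih =>
      intro L2 hp h1 h2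
      cases L2 with
      | nil => exact absurd hp.symm (by simp)
      | cons c t2 =>
          by_cases hac : a = c
          · subst hac
            have := ih (hp.cons_inv) (List.pairwise_cons.mp h1).2 (List.pairwise_cons.mp h2).2
            rw [this]
          · exfalso
            have hcL1 : c ∈ a :: t1 := hp.symm.subset (by simp)
            have hc1 : c ∈ t1 := by
              rcases List.mem_cons.mp hcL1 with hh | hh
              · exact absurd hh.symm hac
              · exact hh
            have haL2 : a ∈ c :: t2 := hp.subset (by simp)
            have ha2 : a ∈ t2 := by
              rcases List.mem_cons.mp haL2 with hh | hh
              · exact absurd hh hac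
              · exact hh
            have hfalse : b c a = false := (List.pairwise_cons.mp h1).1 c hc1
            have htrue : b c a = true := (List.pairwise_cons.mp h2).1 a ha2
            simp [hfalse] at htrue


-- --- A-side: the reverse=True sort of tm is the lex sort of its enumeration ---
def pvBA (a b : String × Int) : Bool := decide (PySem.Str.len b.1 < PySem.Str.len a.1)

def pvSortE (L : List (Int × (String × Int))) : List (Int × (String × Int)) :=
  L.foldl (fun acc e => PySem.List.insertBy pvBE e acc) []

def pvSE (tm : List (String × Int)) : List (Int × (String × Int)) :=
  pvSortE (PySem.List.enumerate tm 0)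

def pvBest (L : List (Int × (String × Int))) : PySem.Dict Int (String × Int) :=
  L.foldl pvStepB PySem.Dict.empty

theorem pvBE_last (n : Int) (x : String × Int) (f : Int × (String × Int)) (h : f.1 < n) :
    pvBE (n, x) f = pvBA x f.2 := by
  simp only [pvBE, pvLex, pvBA]
  rw [show decide (n < f.1) = false from decide_eq_false (by omega)]
  simp only [Bool.and_false, Bool.or_false, decide_eq_decide]
  omega

theorem map_insertBy_last (l : List (Int × (String × Int))) (n : Int) (x : String × Int)
    (h : ∀ f ∈ l, f.1 < n) :
    (PySem.List.insertBy pvBE (n, x) l).map Prod.snd =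
      PySem.List.insertBy pvBA x (l.map Prod.snd) := by
  induction l with
  | nil => simp [insertBy_nil]
  | cons f l ih =>
      rw [insertBy_cons, List.map_cons, insertBy_cons, pvBE_last n x f (h f (by simp))]
      by_cases hb : pvBA x f.2 = true
      · simp [hb]
      · simp only [hb]
        rw [if_neg Bool.false_ne_true, if_neg Bool.false_ne_true, List.map_cons,
          ih (fun g hg => h g (by simp [hg]))]

theorem sortE_perm (L : List (Int × (String × Int))) : (pvSortE L).Perm L :=
  foldl_insertBy_perm pvBE L

theorem pvBE_irr (a : Int × (String × Int)) : pvBE a a = false :=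
  pvLex_irr _ _ a

theorem pvBE_htr (x y z : Int × (String × Int)) :
    pvBE x y = true → pvBE z y = false → pvBE z x = false :=
  pvLex_htr _ _ x y z

theorem sortedA_eq (tm : List (String × Int)) :
    PySem.List.sorted tm (fun x => PySem.Str.len x.1) true = (pvSE tm).map Prod.snd := by
  rw [PySem.List.sorted_rev_eq_foldl_insertBy]
  show tm.foldl (fun acc x => PySem.List.insertBy pvBA x acc) [] = (pvSE tm).map Prod.snd
  induction tm using List.reverseRecOn with
  | nil => rfl
  | append_singleton tm x ih =>
      have henum : PySem.List.enumerate (tm ++ [x]) 0 =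
          PySem.List.enumerate tm 0 ++ [((tm.length : Int), x)] := by
        rw [PySem.List.enumerate_append]
        simp [PySem.List.enumerate_cons, PySem.List.enumerate_nil]
      have hbound : ∀ f ∈ pvSE tm, f.1 < (tm.length : Int) := by
        intro f hf
        have hf' := (sortE_perm _).subset hf
        rcases (PySem.List.mem_enumerate_iff _ _ _).mp hf' with ⟨k, hk, hfk⟩
        subst hfk
        simpa using hk
      rw [List.foldl_append]
      simp only [List.foldl_cons, List.foldl_nil]
      rw [ih]
      show PySem.List.insertBy pvBA x ((pvSE tm).map Prod.snd) = _
      rw [← map_insertBy_last (pvSE tm) (tm.length : Int) x hbound]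
      unfold pvSE pvSortE
      rw [henum, List.foldl_append]
      simp

-- --- strictness of the sorted enumeration ---
theorem enum_nodup_fst (tm : List (String × Int)) :
    (PySem.List.enumerate tm 0).Pairwise (fun p q => p.1 ≠ q.1) :=
  (PySem.List.pairwise_lt_enumerate tm 0).imp (fun h => ne_of_lt h)

theorem sortE_pairwise_strict (tm : List (String × Int)) :
    (pvSE tm).Pairwise (fun p q => pvBE p q = true) := by
  have h1 : (pvSE tm).Pairwise (fun p q => pvBE q p = false) :=
    foldl_insertBy_pairwise pvBE pvBE_irr pvBE_htr _
  have h2 : (pvSE tm).Pairwise (fun p q : Int × (String × Int) => p.1 ≠ q.1) :=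
    (List.Perm.pairwise_iff (fun {_ _} h he => h he.symm) (sortE_perm _)).mpr (enum_nodup_fst tm)
  exact (h1.and h2).imp (fun ⟨hf, hne⟩ => pvLex_true_of_false_of_ne _ _ _ _ hf hne)

theorem enum_nodup (tm : List (String × Int)) : (PySem.List.enumerate tm 0).Nodup :=
  (PySem.List.pairwise_lt_enumerate tm 0).imp
    (fun h => by intro he; rw [he] at h; exact lt_irrefl _ h)

-- --- A's dedup loop keeps first occurrences ---
theorem foldA_items (L : List (Int × (String × Int))) : ∀ (seen : List Int)
    (d : PySem.Dict Int String), (∀ t, d.contains t = decide (t ∈ seen)) →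
    (L.foldl (fun d e => pvStepA d e.2) d).items =
      d.items ++ (pvFirsts seen L).map (fun e => (e.2.2, PySem.Str.stripChars e.2.1 "/")) := by
  induction L with
  | nil => intro seen d _; simp [pvFirsts]
  | cons e L ih =>
      intro seen d hseen
      simp only [List.foldl_cons]
      by_cases hm : e.2.2 ∈ seen
      · have hc : d.contains e.2.2 = true := by rw [hseen]; simp [hm]
        rw [pvFirsts, if_pos hm]
        have hstep : pvStepA d e.2 = d := by simp [pvStepA, hc]
        rw [hstep]
        exact ih seen d hseen
      · have hc : d.contains e.2.2 = false := by rw [hseen]; simp [hm]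
        have hstep : pvStepA d e.2 = d.insert e.2.2 (PySem.Str.stripChars e.2.1 "/") := by
          simp [pvStepA, hc]
        rw [pvFirsts, if_neg hm, hstep]
        have hseen' : ∀ t, (d.insert e.2.2 (PySem.Str.stripChars e.2.1 "/")).contains t =
            decide (t ∈ e.2.2 :: seen) := by
          intro t
          rw [PySem.Dict.contains_insert, hseen t]
          by_cases ht : t = e.2.2 <;> simp [ht]
        rw [ih _ _ hseen', PySem.Dict.items_insert_of_not_contains d _ hc]
        simp

theorem firsts_sublist (seen : List Int) (L : List (Int × (String × Int))) :
    (pvFirsts seen L).Sublist L := by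
  induction L generalizing seen with
  | nil => simp [pvFirsts]
  | cons e L ih =>
      rw [pvFirsts]
      by_cases h : e.2.2 ∈ seen
      · simp only [h, if_pos]
        exact (ih seen).cons e
      · simp only [h]
        exact (ih _).cons₂ e

theorem mem_firsts (L : List (Int × (String × Int)))
    (hs : L.Pairwise (fun p q => pvBE p q = true)) : ∀ (seen : List Int)
    (e : Int × (String × Int)),
    e ∈ pvFirsts seen L ↔
      e ∈ L ∧ e.2.2 ∉ seen ∧ ∀ f ∈ L, f.2.2 = e.2.2 → f = e ∨ pvBE e f = true := by
  induction L with
  | nil => intro seen e; simp [pvFirsts]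
  | cons a L ih =>
      intro seen e
      rcases List.pairwise_cons.mp hs with ⟨ha, hL⟩
      rw [pvFirsts]
      by_cases hm : a.2.2 ∈ seen
      · rw [if_pos hm, ih hL seen e]
        constructor
        · rintro ⟨heL, hes, hmin⟩
          refine ⟨List.mem_cons_of_mem a heL, hes, ?_⟩
          intro f hf htid
          rcases List.mem_cons.mp hf with rfl | hf'
          · exact absurd (htid ▸ hm) hes
          · exact hmin f hf' htid
        · rintro ⟨heL, hes, hmin⟩
          have heL' : e ∈ L := by
            rcases List.mem_cons.mp heL with rfl | h
            · exact absurd hm hes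
            · exact h
          exact ⟨heL', hes, fun f hf htid => hmin f (List.mem_cons_of_mem a hf) htid⟩
      · rw [if_neg hm]
        constructor
        · intro h
          rcases List.mem_cons.mp h with rfl | h'
          · refine ⟨List.mem_cons_self, hm, ?_⟩
            intro f hf htid
            rcases List.mem_cons.mp hf with rfl | hf'
            · exact Or.inl rfl
            · exact Or.inr (ha f hf')
          · rcases (ih hL _ e).mp h' with ⟨heL, hes, hmin⟩
            have hes0 : e.2.2 ∉ seen := fun hx => hes (List.mem_cons_of_mem _ hx)
            have hne : e.2.2 ≠ a.2.2 := fun hx => hes (hx ▸ List.mem_cons_self)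
            refine ⟨List.mem_cons_of_mem a heL, hes0, ?_⟩
            intro f hf htid
            rcases List.mem_cons.mp hf with rfl | hf'
            · exact absurd htid.symm hne
            · exact hmin f hf' htid
        · rintro ⟨heL, hes, hmin⟩
          by_cases hea : e = a
          · subst hea; exact List.mem_cons_self
          · have heL' : e ∈ L := by
              rcases List.mem_cons.mp heL with rfl | h
              · exact absurd rfl hea
              · exact h
            have hne : e.2.2 ≠ a.2.2 := by
              intro hx
              rcases hmin a List.mem_cons_self hx.symm with h1 | h1
              · exact hea h1.symm
              · have h2 : pvBE a e = true := ha e heL'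
                have h3 : pvBE e a = false := pvhelp_asym pvBE pvBE_irr pvBE_htr a e h2
                simp [h3] at h1
            refine List.mem_cons_of_mem a ((ih hL _ e).mpr ⟨heL', ?_, ?_⟩)
            · intro hx
              rcases List.mem_cons.mp hx with hx' | hx'
              · exact hne hx'
              · exact hes hx'
            · exact fun f hf htid => hmin f (List.mem_cons_of_mem a hf) htid

theorem winOf_unique (P : List (Int × (String × Int))) (e e' : Int × (String × Int))
    (h : pvWinOf P e) (h' : pvWinOf P e') (ht : e'.2.2 = e.2.2) : e = e' := by
  rcases h.2 e' h'.1 ht with he | he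
  · exact he.symm
  rcases h'.2 e h.1 ht.symm with he' | he'
  · exact he'
  exact absurd he' (by simp [pvhelp_asym pvBE pvBE_irr pvBE_htr e e' he])


theorem pvBE_of_len_lt (e f : Int × (String × Int))
    (h : PySem.Str.len f.2.1 < PySem.Str.len e.2.1) : pvBE e f = true := by
  simp only [pvBE, pvLex, Bool.or_eq_true, Bool.and_eq_true, decide_eq_true_eq]
  omega

theorem pvBE_of_len_le_of_idx_lt (e f : Int × (String × Int))
    (h1 : PySem.Str.len f.2.1 ≤ PySem.Str.len e.2.1) (h2 : e.1 < f.1) : pvBE e f = true := by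
  simp only [pvBE, pvLex, Bool.or_eq_true, Bool.and_eq_true, Bool.not_eq_true',
    decide_eq_true_eq, decide_eq_false_iff_not]
  omega

theorem winOf_append_ne (P : List (Int × (String × Int))) (x e : Int × (String × Int))
    (hne : e.2.2 ≠ x.2.2) : pvWinOf (P ++ [x]) e ↔ pvWinOf P e := by
  unfold pvWinOf
  constructor
  · rintro ⟨hmem, hmin⟩
    have hmemP : e ∈ P := by
      rcases List.mem_append.mp hmem with h | h
      · exact h
      · exact absurd (congrArg (fun z => z.2.2) (List.mem_singleton.mp h)) hne
    exact ⟨hmemP, fun f hf ht => hmin f (List.mem_append_left _ hf) ht⟩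
  · rintro ⟨hmem, hmin⟩
    refine ⟨List.mem_append_left _ hmem, ?_⟩
    intro f hf ht
    rcases List.mem_append.mp hf with h | h
    · exact hmin f h ht
    · exact absurd (ht.symm.trans (congrArg (fun z => z.2.2) (List.mem_singleton.mp h))) hne

theorem best_insert_case (P : List (Int × (String × Int))) (x : Int × (String × Int))
    (D : PySem.Dict Int (String × Int)) (hnd : D.keys.Nodup)
    (hcont : ∀ t, (D.contains t = true ↔ ∃ e ∈ P, e.2.2 = t))
    (hget : ∀ t v, (D.get? t = some v ↔ ∃ e, pvWinOf P e ∧ e.2.2 = t ∧ v = (e.2.1, e.1)))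
    (hwx : pvWinOf (P ++ [x]) x) :
    (D.insert x.2.2 (x.2.1, x.1)).keys.Nodup ∧
    (∀ t, ((D.insert x.2.2 (x.2.1, x.1)).contains t = true ↔ ∃ e ∈ P ++ [x], e.2.2 = t)) ∧
    (∀ t v, ((D.insert x.2.2 (x.2.1, x.1)).get? t = some v ↔
      ∃ e, pvWinOf (P ++ [x]) e ∧ e.2.2 = t ∧ v = (e.2.1, e.1))) := by
  refine ⟨PySem.Dict.nodup_keys_insert _ _ _ hnd, ?_, ?_⟩
  · intro t
    rw [PySem.Dict.contains_insert]
    by_cases ht : t = x.2.2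
    · refine iff_of_true (by simp [ht]) ⟨x, by simp, ht.symm⟩
    · have hbeq : (t == x.2.2) = false := by simp [ht]
      rw [hbeq, Bool.false_or, hcont t]
      constructor
      · rintro ⟨e, he, hte⟩; exact ⟨e, List.mem_append_left _ he, hte⟩
      · rintro ⟨e, he, hte⟩
        rcases List.mem_append.mp he with h | h
        · exact ⟨e, h, hte⟩
        · exact absurd (hte.symm.trans (congrArg (fun z => z.2.2) (List.mem_singleton.mp h))) ht
  · intro t v
    rw [PySem.Dict.get?_insert]
    by_cases ht : t = x.2.2
    · rw [if_pos ht]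
      constructor
      · intro hv
        refine ⟨x, hwx, ht.symm, ?_⟩
        simpa using hv.symm
      · rintro ⟨e, hwe, hte, hve⟩
        have hex : x = e := winOf_unique (P ++ [x]) x e hwx hwe (hte.trans ht)
        rw [hve, ← hex]
    · rw [if_neg ht, hget t v]
      constructor
      · rintro ⟨e, hwe, hte, hve⟩
        exact ⟨e, (winOf_append_ne P x e (fun hh => ht (hte.symm.trans hh))).mpr hwe, hte, hve⟩
      · rintro ⟨e, hwe, hte, hve⟩
        exact ⟨e, (winOf_append_ne P x e (fun hh => ht (hte.symm.trans hh))).mp hwe, hte, hve⟩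

-- --- B's running-best loop computes the per-tid winners ---
theorem best_inv (L : List (Int × (String × Int))) (hp : L.Pairwise (fun p q => p.1 < q.1)) :
    (pvBest L).keys.Nodup ∧
    (∀ t, ((pvBest L).contains t = true ↔ ∃ e ∈ L, e.2.2 = t)) ∧
    (∀ t v, ((pvBest L).get? t = some v ↔
      ∃ e, pvWinOf L e ∧ e.2.2 = t ∧ v = (e.2.1, e.1))) := by
  induction L using List.reverseRecOn with
  | nil =>
      refine ⟨List.nodup_nil, ?_, ?_⟩
      · intro t; simp [pvBest, PySem.Dict.contains_empty]
      · intro t v; simp [pvBest, PySem.Dict.get?_empty, pvWinOf]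
  | append_singleton P x ih =>
      have hsplit := List.pairwise_append.mp hp
      have hpP := hsplit.1
      have hxall : ∀ f ∈ P, f.1 < x.1 := fun f hf => hsplit.2.2 f hf x (by simp)
      obtain ⟨hnd, hcont, hget⟩ := ih hpP
      have hfold : pvBest (P ++ [x]) = pvStepB (pvBest P) x := by
        simp [pvBest, List.foldl_append]
      cases hcur : (pvBest P).get? x.2.2 with
      | none =>
          have hnoP : ¬ ∃ e ∈ P, e.2.2 = x.2.2 := by
            intro hex
            have h1 : (pvBest P).contains x.2.2 = true := (hcont x.2.2).mpr hex
            rw [PySem.Dict.contains_eq_isSome_get?, hcur] at h1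
            simp at h1
          have hwx : pvWinOf (P ++ [x]) x := by
            refine ⟨by simp, ?_⟩
            intro f hf htid
            rcases List.mem_append.mp hf with hfP | hfx
            · exact absurd ⟨f, hfP, htid⟩ hnoP
            · exact Or.inl (List.mem_singleton.mp hfx)
          have hstep : pvStepB (pvBest P) x = (pvBest P).insert x.2.2 (x.2.1, x.1) := by
            simp [pvStepB, hcur]
          rw [hfold, hstep]
          exact best_insert_case P x (pvBest P) hnd hcont hget hwx
      | some cur =>
          obtain ⟨w, hww, hwt, hcurv⟩ := (hget x.2.2 cur).mp hcur
          by_cases hlen : PySem.Str.len x.2.1 > PySem.Str.len cur.1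
          · have hstep : pvStepB (pvBest P) x = (pvBest P).insert x.2.2 (x.2.1, x.1) := by
              simp only [pvStepB, hcur]
              rw [if_pos hlen]
            have hbxw : pvBE x w = true := by
              refine pvBE_of_len_lt x w ?_
              rw [hcurv] at hlen
              exact hlen
            have hwx : pvWinOf (P ++ [x]) x := by
              refine ⟨by simp, ?_⟩
              intro f hf htid
              rcases List.mem_append.mp hf with hfP | hfx
              · refine Or.inr ?_
                rcases hww.2 f hfP (htid.trans hwt.symm) with heq | hbe
                · rw [heq]; exact hbxw
                · exact pvLex_trans _ _ x w f hbxw hbe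
              · exact Or.inl (List.mem_singleton.mp hfx)
            rw [hfold, hstep]
            exact best_insert_case P x (pvBest P) hnd hcont hget hwx
          · have hstep : pvStepB (pvBest P) x = pvBest P := by
              simp only [pvStepB, hcur]
              rw [if_neg hlen]
            have hbwx : pvBE w x = true := by
              refine pvBE_of_len_le_of_idx_lt w x ?_ (hxall w hww.1)
              rw [hcurv] at hlen
              simp at hlen ⊢
              omega
            have hwx : pvWinOf (P ++ [x]) w := by
              refine ⟨List.mem_append_left _ hww.1, ?_⟩
              intro f hf htid
              rcases List.mem_append.mp hf with hfP | hfx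
              · exact hww.2 f hfP htid
              · refine Or.inr ?_
                rw [List.mem_singleton.mp hfx]
                exact hbwx
            rw [hfold, hstep]
            refine ⟨hnd, ?_, ?_⟩
            · intro t
              rw [hcont t]
              constructor
              · rintro ⟨e, he, hte⟩; exact ⟨e, List.mem_append_left _ he, hte⟩
              · rintro ⟨e, he, hte⟩
                rcases List.mem_append.mp he with h | h
                · exact ⟨e, h, hte⟩
                · refine ⟨w, hww.1, ?_⟩
                  rw [hwt, ← hte, List.mem_singleton.mp h]
            · intro t v
              rw [hget t v]
              constructor
              · rintro ⟨e, hwe, hte, hve⟩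
                by_cases ht : e.2.2 = x.2.2
                · have heq : e = w := winOf_unique P e w hwe hww (hwt.trans ht.symm)
                  exact ⟨w, hwx, heq ▸ hte, heq ▸ hve⟩
                · exact ⟨e, (winOf_append_ne P x e ht).mpr hwe, hte, hve⟩
              · rintro ⟨e, hwe, hte, hve⟩
                by_cases ht : e.2.2 = x.2.2
                · have heq : e = w := winOf_unique (P ++ [x]) e w hwe hwx (hwt.trans ht.symm)
                  exact ⟨w, hww, heq ▸ hte, heq ▸ hve⟩
                · exact ⟨e, (winOf_append_ne P x e ht).mp hwe, hte, hve⟩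

theorem pvG_inj : Function.Injective pvG := by
  intro a b h
  cases a with | mk i p => cases p with | mk s t =>
  cases b with | mk i' p' => cases p' with | mk s' t' =>
  simp [pvG] at h
  simp [h]


theorem winners_eq (tm : List (String × Int)) :
    PySem.List.sorted2 (pvBest (PySem.List.enumerate tm 0)).items
      (fun kv => -(PySem.Str.len kv.2.1)) (fun kv => kv.2.2) false
    = (pvFirsts [] (pvSE tm)).map pvG := by
  obtain ⟨hnd, hcont, hget⟩ :=
    best_inv (PySem.List.enumerate tm 0) (PySem.List.pairwise_lt_enumerate tm 0)
  have hSEnodup : (pvSE tm).Nodup := ((sortE_perm _).nodup_iff).mpr (enum_nodup tm)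
  have hFnodup : (pvFirsts [] (pvSE tm)).Nodup := (firsts_sublist _ _).nodup hSEnodup
  have hnd' : ((pvBest (PySem.List.enumerate tm 0)).items.map
      (fun p : Int × (String × Int) => p.1)).Nodup := hnd
  have hWnodup : (pvBest (PySem.List.enumerate tm 0)).items.Nodup :=
    List.Nodup.of_map (fun p => p.1) hnd'
  have hmem : ∀ p, p ∈ (pvBest (PySem.List.enumerate tm 0)).items ↔
      p ∈ (pvFirsts [] (pvSE tm)).map pvG := by
    intro p
    rw [List.mem_map]
    constructor
    · intro hp
      have h1 : (pvBest (PySem.List.enumerate tm 0)).get? p.1 = some p.2 :=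
        (PySem.Dict.get?_eq_some_iff_mem_items _ p.1 p.2 hnd).mpr (by simpa using hp)
      obtain ⟨e, hwe, hte, hve⟩ := (hget p.1 p.2).mp h1
      refine ⟨e, ?_, ?_⟩
      · rw [mem_firsts _ (sortE_pairwise_strict tm) [] e]
        refine ⟨(sortE_perm _).mem_iff.mpr hwe.1, by simp, ?_⟩
        intro f hf htid
        exact hwe.2 f ((sortE_perm _).subset hf) htid
      · exact Prod.ext hte hve.symm
    · rintro ⟨e, hf, rfl⟩
      rw [mem_firsts _ (sortE_pairwise_strict tm) [] e] at hf
      obtain ⟨hmemSE, -, hmin⟩ := hf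
      have hwin : pvWinOf (PySem.List.enumerate tm 0) e :=
        ⟨(sortE_perm _).subset hmemSE,
         fun f hf' ht => hmin f ((sortE_perm _).mem_iff.mpr hf') ht⟩
      have h1 : (pvBest (PySem.List.enumerate tm 0)).get? e.2.2 = some (e.2.1, e.1) :=
        (hget e.2.2 (e.2.1, e.1)).mpr ⟨e, hwin, rfl, rfl⟩
      have h2 := (PySem.Dict.get?_eq_some_iff_mem_items _ _ _ hnd).mp h1
      simpa [pvG] using h2
  have hperm : ((pvBest (PySem.List.enumerate tm 0)).items.foldl
      (fun acc x => PySem.List.insertBy pvBW x acc) []).Perm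
      ((pvFirsts [] (pvSE tm)).map pvG) :=
    (foldl_insertBy_perm pvBW _).trans
      ((List.perm_ext_iff_of_nodup hWnodup (hFnodup.map pvG_inj)).mpr hmem)
  have hpw1 := foldl_insertBy_pairwise pvBW (fun a => pvLex_irr _ _ a)
    (fun x y z => pvLex_htr _ _ x y z) (pvBest (PySem.List.enumerate tm 0)).items
  have hpw2 : ((pvFirsts [] (pvSE tm)).map pvG).Pairwise (fun p q => pvBW p q = true) :=
    List.pairwise_map.mpr ((List.Pairwise.sublist (firsts_sublist [] (pvSE tm))
      (sortE_pairwise_strict tm)).imp (fun h => h))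
  exact perm_pairwise_unique pvBW hperm hpw1 hpw2

theorem aA_eq (tm : List (String × Int)) :
    build_reverse_topic_map_py tm =
      (pvFirsts [] (pvSE tm)).map (fun e => (e.2.2, PySem.Str.stripChars e.2.1 "/")) := by
  unfold build_reverse_topic_map_py
  rw [sortedA_eq, List.foldl_map]
  rw [foldA_items (pvSE tm) [] PySem.Dict.empty
    (fun t => by simp [PySem.Dict.contains_empty])]
  rfl

theorem altB_eq (tm : List (String × Int)) :
    build_reverse_topic_map_py_alt tm =
      (pvFirsts [] (pvSE tm)).map (fun e => (e.2.2, PySem.Str.stripChars e.2.1 "/")) := by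
  obtain ⟨hnd, -, -⟩ :=
    best_inv (PySem.List.enumerate tm 0) (PySem.List.pairwise_lt_enumerate tm 0)
  show ((PySem.List.sorted2 (pvBest (PySem.List.enumerate tm 0)).items
      (fun kv => -(PySem.Str.len kv.2.1)) (fun kv => kv.2.2) false).foldl
      (fun out kv => out.insert kv.1 (PySem.Str.stripChars kv.2.1 "/"))
      PySem.Dict.empty).items = _
  have hkeys : (((pvFirsts [] (pvSE tm)).map pvG).map (fun kv => kv.1)).Nodup := by
    have hperm : ((pvFirsts [] (pvSE tm)).map pvG).Perm
        (pvBest (PySem.List.enumerate tm 0)).items :=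
      (winners_eq tm) ▸ PySem.List.sorted2_perm _ _ _ _
    have hnd' : ((pvBest (PySem.List.enumerate tm 0)).items.map
        (fun kv : Int × (String × Int) => kv.1)).Nodup := hnd
    exact ((hperm.map (fun kv => kv.1)).nodup_iff).mpr hnd'
  rw [winners_eq tm]
  rw [PySem.Dict.items_foldl_insert_fresh ((pvFirsts [] (pvSE tm)).map pvG)
    (fun kv => kv.1) (fun kv => PySem.Str.stripChars kv.2.1 "/") PySem.Dict.empty
    (fun a _ => PySem.Dict.contains_empty _) hkeys]
  show ([] : List (Int × String)) ++ _ = _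
  rw [List.nil_append, List.map_map]
  exact List.map_congr_left (fun e _ => rfl)

theorem build_reverse_topic_map_py_spec_aux (tm : List (String × Int)) :
    build_reverse_topic_map_py tm = build_reverse_topic_map_py_alt tm :=
  (aA_eq tm).trans (altB_eq tm).symm

-- ===== VERDICT (by name: the statement is the Claim_ definition above) =====
theorem build_reverse_topic_map_py_spec : Claim_equal_build_reverse_topic_map_py := by
  intro tm _
  unfold Spec_build_reverse_topic_map_py
  exact build_reverse_topic_map_py_spec_aux tm
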